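-- pv_equiv track=rewrite | github.com/DevSecOpsLab-CSIE-NPU/austronesian-replication | scripts/xfam_ie_cultural_concepts.py | _root_of
-- ===== SOURCE A (Python) =====
-- def _root_of(node: int, parent_map: dict[int, int]) -> int:
--     """Walk parent_map until a node with no parent is reached. Cycle-safe."""
--     seen: set[int] = set()
--     while node in parent_map:
--         if node in seen:
--             return node
--         seen.add(node)
--         node = parent_map[node]
--     return node
-- ===== SOURCE B (Python) =====
-- def _root_of(node: int, parent_map: dict[int, int]) -> int:
--     """Walk parent_map until a node with no parent is reached. Cycle-safe.
--
--     Floyd's tortoise-and-hare: O(1) extra space instead of a seen-set.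
--     """
--     slow = fast = node
--     while True:
--         if fast not in parent_map:
--             return fast
--         fast = parent_map[fast]
--         if fast not in parent_map:
--             return fast
--         fast = parent_map[fast]
--         slow = parent_map[slow]
--         if slow == fast:
--             break
--     # A cycle was found: the first node A would revisit is the cycle entry.
--     slow = node
--     while slow != fast:
--         slow = parent_map[slow]
--         fast = parent_map[fast]
--     return slow
-- ===== Notes on version B (the rewrite author's own statement) =====
-- stated objective: alternative
-- what changed: Replaced the growing seen-set with Floyd's two-pointer cycle detection (tortoise/hare plus the standard cycle-entry phase), using O(1) extra space instead of O(n).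
import Mathlib
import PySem

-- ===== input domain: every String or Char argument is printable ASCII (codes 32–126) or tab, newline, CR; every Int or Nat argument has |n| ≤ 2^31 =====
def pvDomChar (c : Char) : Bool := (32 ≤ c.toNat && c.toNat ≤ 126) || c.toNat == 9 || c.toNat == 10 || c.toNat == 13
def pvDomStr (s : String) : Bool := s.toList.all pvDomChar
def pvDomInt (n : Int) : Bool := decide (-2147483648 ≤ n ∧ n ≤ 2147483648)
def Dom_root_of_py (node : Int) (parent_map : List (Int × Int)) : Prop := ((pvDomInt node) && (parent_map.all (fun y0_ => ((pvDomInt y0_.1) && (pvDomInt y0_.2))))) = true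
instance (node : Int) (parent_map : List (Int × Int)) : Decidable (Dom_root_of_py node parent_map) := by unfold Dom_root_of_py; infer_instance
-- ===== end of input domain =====

-- B replaces A's growing seen-set walk by Floyd's two-pointer cycle detection (O(1) extra space); return values proved equal.

-- shared rendering of the dict primitives: `x in parent_map` (pvMem) and `parent_map[x]` (pvStep, used only under the membership guard)
def pvMem (m : List (Int × Int)) (x : Int) : Bool := ((PySem.Dict.mk m).get? x).isSome
def pvStep (m : List (Int × Int)) (x : Int) : Int := ((PySem.Dict.mk m).get? x).getD x

-- ===== PORT A =====
-- A's while-loop; fuel m.length + 1 is proved sufficient below (each iteration adds a fresh key to `seen`)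
def rootOfLoopA (m : List (Int × Int)) : Nat → Int → PySem.Set Int → Int
  | 0, node, _ => node
  | fuel+1, node, seen =>
    if pvMem m node then
      if seen.contains node then node
      else rootOfLoopA m fuel (pvStep m node) (PySem.Set.add seen node)
    else node

def root_of_py (node : Int) (parent_map : List (Int × Int)) : Int :=
  rootOfLoopA parent_map (parent_map.length + 1) node PySem.Set.empty

-- ===== PORT B =====
-- phase 2 of Floyd: `while slow != fast: advance both once; return slow`
def rootOfLoop2 (m : List (Int × Int)) : Nat → Int → Int → Int
  | 0, slow, _ => slow
  | fuel+1, slow, fast =>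
    if slow = fast then slow
    else rootOfLoop2 m fuel (pvStep m slow) (pvStep m fast)

-- phase 1 of Floyd: fast moves two steps (returning it as the root when it leaves the map), slow one; break on meet
def rootOfLoop1 (m : List (Int × Int)) (node : Int) : Nat → Int → Int → Int
  | 0, slow, _ => slow
  | fuel+1, slow, fast =>
    if pvMem m fast then
      let fast1 := pvStep m fast
      if pvMem m fast1 then
        let fast2 := pvStep m fast1
        let slow1 := pvStep m slow
        if slow1 = fast2 then rootOfLoop2 m (m.length + 1) node fast2
        else rootOfLoop1 m node fuel slow1 fast2
      else fast1
    else fast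

def root_of_py_alt (node : Int) (parent_map : List (Int × Int)) : Int :=
  rootOfLoop1 parent_map node (parent_map.length + 1) node node

-- ===== PRECONDITION & SPEC =====
def Spec_root_of_py (node : Int) (parent_map : List (Int × Int)) (out : Int) : Prop := out = root_of_py_alt node parent_map
instance (node : Int) (parent_map : List (Int × Int)) (out : Int) : Decidable (Spec_root_of_py node parent_map out) := by unfold Spec_root_of_py; infer_instance

-- ===== CLAIM (what is proved, stated in full; the proofs are below) =====
def Claim_equal_root_of_py : Prop := ∀ (node : Int) (parent_map : List (Int × Int)), Dom_root_of_py node parent_map → Spec_root_of_py node parent_map (root_of_py node parent_map)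

-- ===== LEMMAS AND PROOFS =====

-- the orbit of `node` under the (absorbing) step function
def pvIt (m : List (Int × Int)) (node : Int) (i : Nat) : Int := (pvStep m)^[i] node

lemma pvIt_succ (m : List (Int × Int)) (node : Int) (i : Nat) :
    pvIt m node (i+1) = pvStep m (pvIt m node i) := Function.iterate_succ_apply' _ _ _

lemma pvIt_add (m : List (Int × Int)) (node : Int) (t a : Nat) :
    pvIt m node (t + a) = (pvStep m)^[t] (pvIt m node a) := Function.iterate_add_apply _ _ _ _

lemma pvStep_absorb (m : List (Int × Int)) (x : Int) (h : pvMem m x = false) : pvStep m x = x := by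
  unfold pvMem at h
  unfold pvStep
  cases hx : (PySem.Dict.mk m).get? x with
  | none => rfl
  | some v => rw [hx] at h; simp at h

def pvRepB (m : List (Int × Int)) (node : Int) (s : Nat) : Bool :=
  (List.range s).any (fun i => pvIt m node i == pvIt m node s)

lemma pvRepB_iff (m : List (Int × Int)) (node : Int) (s : Nat) :
    pvRepB m node s = true ↔ ∃ i, i < s ∧ pvIt m node i = pvIt m node s := by
  simp [pvRepB, List.any_eq_true, List.mem_range]

lemma pvMem_mem_keys (m : List (Int × Int)) (x : Int) (h : pvMem m x = true) : x ∈ m.map Prod.fst := by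
  induction m with
  | nil =>
    rw [pvMem, show ((PySem.Dict.mk ([] : List (Int × Int))).get? x) = none from rfl] at h
    simp at h
  | cons p rest ih =>
    obtain ⟨k, v⟩ := p
    rw [pvMem, PySem.Dict.get?_mk_cons] at h
    by_cases hk : (k == x) = true
    · simp only [List.map_cons, List.mem_cons]
      left
      exact (eq_of_beq hk).symm
    · simp only [hk, Bool.false_eq_true, if_false] at h
      simp only [List.map_cons, List.mem_cons]
      right
      exact ih h

lemma pvCount (m : List (Int × Int)) (node : Int) (c : Nat)
    (hmem : ∀ i, i < c → pvMem m (pvIt m node i) = true)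
    (hinj : ∀ i j, i < j → j < c → pvIt m node i ≠ pvIt m node j) :
    c ≤ m.length := by
  have hn : ((List.range c).map (pvIt m node)).Nodup := by
    apply List.Nodup.map_on ?_ (List.nodup_range)
    intro x hx y hy hxy
    simp only [List.mem_range] at hx hy
    rcases Nat.lt_trichotomy x y with h|h|h
    · exact absurd hxy (hinj x y h hy)
    · exact h
    · exact absurd hxy.symm (hinj y x h hx)
  have hsub : (List.range c).map (pvIt m node) ⊆ m.map Prod.fst := by
    intro y hy
    simp only [List.mem_map, List.mem_range] at hy
    obtain ⟨i, hi, rfl⟩ := hy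
    exact pvMem_mem_keys m _ (hmem i hi)
  have hle : ((List.range c).map (pvIt m node)).length ≤ (m.map Prod.fst).length := by
    calc ((List.range c).map (pvIt m node)).length
        = ((List.range c).map (pvIt m node)).toFinset.card := (List.toFinset_card_of_nodup hn).symm
      _ ≤ (m.map Prod.fst).toFinset.card := Finset.card_le_card (by
            intro x hx; simp only [List.mem_toFinset] at *; exact hsub hx)
      _ ≤ (m.map Prod.fst).length := (m.map Prod.fst).toFinset_card_le
  simpa using hle

lemma pvRepExists (m : List (Int × Int)) (node : Int) : ∃ s, pvRepB m node s = true := by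
  by_contra h
  have h : ∀ s, ¬ pvRepB m node s = true := fun s hs => h ⟨s, hs⟩
  have hinj : ∀ i j, i < j → pvIt m node i ≠ pvIt m node j := by
    intro i j hij heq
    exact h j ((pvRepB_iff m node j).mpr ⟨i, hij, heq⟩)
  have hmem : ∀ i, pvMem m (pvIt m node i) = true := by
    intro i
    by_contra hm
    have h1 : pvStep m (pvIt m node i) = pvIt m node i :=
      pvStep_absorb _ _ (Bool.eq_false_iff.mpr (by simpa using hm))
    have h2 : pvIt m node (i+1) = pvIt m node i := by rw [pvIt_succ, h1]
    exact hinj i (i+1) (by omega) h2.symm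
  have := pvCount m node (m.length + 1) (fun i _ => hmem i) (fun i j hij _ => hinj i j hij)
  omega

def pvS (m : List (Int × Int)) (node : Int) : Nat := Nat.find (pvRepExists m node)

lemma pvS_rep (m : List (Int × Int)) (node : Int) :
    ∃ i, i < pvS m node ∧ pvIt m node i = pvIt m node (pvS m node) :=
  (pvRepB_iff m node _).mp (Nat.find_spec (pvRepExists m node))

lemma pvS_min (m : List (Int × Int)) (node : Int) (t : Nat) (ht : t < pvS m node) :
    ∀ i, i < t → pvIt m node i ≠ pvIt m node t := by
  intro i hi heq
  exact Nat.find_min (pvRepExists m node) ht ((pvRepB_iff m node t).mpr ⟨i, hi, heq⟩)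

def pvMu (m : List (Int × Int)) (node : Int) : Nat := Nat.find (pvS_rep m node)

lemma pvMu_lt (m : List (Int × Int)) (node : Int) : pvMu m node < pvS m node :=
  (Nat.find_spec (pvS_rep m node)).1

lemma pvMu_eq (m : List (Int × Int)) (node : Int) :
    pvIt m node (pvMu m node) = pvIt m node (pvS m node) :=
  (Nat.find_spec (pvS_rep m node)).2

def pvLam (m : List (Int × Int)) (node : Int) : Nat := pvS m node - pvMu m node

lemma pvLam_pos (m : List (Int × Int)) (node : Int) : 0 < pvLam m node := by
  have := pvMu_lt m node; unfold pvLam; omega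

lemma pv_mu_lam_s (m : List (Int × Int)) (node : Int) :
    pvMu m node + pvLam m node = pvS m node := by
  have := pvMu_lt m node; unfold pvLam; omega

lemma pv_eq_s (m : List (Int × Int)) (node : Int) (i : Nat) (hi : i < pvS m node)
    (h : pvIt m node i = pvIt m node (pvS m node)) : i = pvMu m node := by
  rcases Nat.lt_trichotomy i (pvMu m node) with hc|hc|hc
  · exact absurd (h.trans (pvMu_eq m node).symm) (pvS_min m node (pvMu m node) (pvMu_lt m node) i hc)
  · exact hc
  · exact absurd ((pvMu_eq m node).trans h.symm) (pvS_min m node i hi (pvMu m node) hc)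

lemma pv_period (m : List (Int × Int)) (node : Int) (t : Nat) (ht : pvMu m node ≤ t) :
    pvIt m node (t + pvLam m node) = pvIt m node t := by
  obtain ⟨d, rfl⟩ := Nat.exists_eq_add_of_le ht
  have h1 := pv_mu_lam_s m node
  calc pvIt m node (pvMu m node + d + pvLam m node)
      = pvIt m node (d + pvS m node) := by rw [show pvMu m node + d + pvLam m node = d + (pvMu m node + pvLam m node) from by omega, h1]
    _ = (pvStep m)^[d] (pvIt m node (pvS m node)) := pvIt_add m node d _
    _ = (pvStep m)^[d] (pvIt m node (pvMu m node)) := by rw [← pvMu_eq]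
    _ = pvIt m node (d + pvMu m node) := (pvIt_add m node d _).symm
    _ = pvIt m node (pvMu m node + d) := by rw [Nat.add_comm]

lemma pv_period_mult (m : List (Int × Int)) (node : Int) (t c : Nat) (ht : pvMu m node ≤ t) :
    pvIt m node (t + c * pvLam m node) = pvIt m node t := by
  induction c with
  | zero => simp
  | succ c ih =>
    have : t + (c+1) * pvLam m node = (t + c * pvLam m node) + pvLam m node := by ring
    rw [this, pv_period m node _ (by omega), ih]

def pvR (m : List (Int × Int)) (node : Int) (t : Nat) : Nat :=
  if t < pvS m node then t else pvMu m node + (t - pvMu m node) % pvLam m node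

lemma pvR_lt (m : List (Int × Int)) (node : Int) (t : Nat) : pvR m node t < pvS m node := by
  unfold pvR
  split
  · assumption
  · have h1 := Nat.mod_lt (t - pvMu m node) (pvLam_pos m node)
    have h2 := pv_mu_lam_s m node
    omega

lemma pvIt_pvR (m : List (Int × Int)) (node : Int) (t : Nat) :
    pvIt m node (pvR m node t) = pvIt m node t := by
  unfold pvR
  split
  · rfl
  · rename_i hts
    have hμ : pvMu m node ≤ t := by have := pvMu_lt m node; omega
    have hmd := Nat.mod_add_div (t - pvMu m node) (pvLam m node)
    have hkey : (pvMu m node + (t - pvMu m node) % pvLam m node) + ((t - pvMu m node) / pvLam m node) * pvLam m node = t := by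
      rw [Nat.mul_comm ((t - pvMu m node) / pvLam m node) (pvLam m node)]
      omega
    calc pvIt m node (pvMu m node + (t - pvMu m node) % pvLam m node)
        = pvIt m node ((pvMu m node + (t - pvMu m node) % pvLam m node) + ((t - pvMu m node) / pvLam m node) * pvLam m node) :=
          (pv_period_mult m node _ _ (Nat.le_add_right _ _)).symm
      _ = pvIt m node t := by rw [hkey]

lemma pvR_ge (m : List (Int × Int)) (node : Int) (a : Nat) (ha : pvMu m node ≤ a) :
    pvR m node a = pvMu m node + (a - pvMu m node) % pvLam m node := by
  unfold pvR
  split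
  · rename_i has
    have h2 := pv_mu_lam_s m node
    have : a - pvMu m node < pvLam m node := by omega
    rw [Nat.mod_eq_of_lt this]
    omega
  · rfl

lemma pv_eq_iff (m : List (Int × Int)) (node : Int) (a b : Nat) :
    pvIt m node a = pvIt m node b ↔ pvR m node a = pvR m node b := by
  constructor
  · intro h
    by_contra hne
    have h' : pvIt m node (pvR m node a) = pvIt m node (pvR m node b) := by
      rw [pvIt_pvR, pvIt_pvR]; exact h
    rcases Nat.lt_trichotomy (pvR m node a) (pvR m node b) with hc|hc|hc
    · exact pvS_min m node (pvR m node b) (pvR_lt m node b) (pvR m node a) hc h'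
    · exact hne hc
    · exact pvS_min m node (pvR m node a) (pvR_lt m node a) (pvR m node b) hc h'.symm
  · intro h
    rw [← pvIt_pvR m node a, ← pvIt_pvR m node b, h]

lemma pv_eq_iff_ge (m : List (Int × Int)) (node : Int) (a b : Nat)
    (ha : pvMu m node ≤ a) (hb : pvMu m node ≤ b) :
    pvIt m node a = pvIt m node b ↔ (a - pvMu m node) % pvLam m node = (b - pvMu m node) % pvLam m node := by
  rw [pv_eq_iff, pvR_ge m node a ha, pvR_ge m node b hb]
  omega

lemma pv_mem_of_succ_lt (m : List (Int × Int)) (node : Int) (i : Nat) (h : i + 1 < pvS m node) :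
    pvMem m (pvIt m node i) = true := by
  by_contra hm
  have h1 : pvIt m node (i+1) = pvIt m node i := by
    rw [pvIt_succ, pvStep_absorb _ _ (Bool.eq_false_iff.mpr (by simpa using hm))]
  exact pvS_min m node (i+1) h i (by omega) h1.symm

-- the break condition of Floyd's phase 1, characterised
lemma pv_break_iff (m : List (Int × Int)) (node : Int) (t : Nat) (ht : 1 ≤ t) :
    pvIt m node t = pvIt m node (2*t) ↔ (pvMu m node ≤ t ∧ pvLam m node ∣ t) := by
  constructor
  · intro h
    have hmu : pvMu m node ≤ t := by
      by_contra hlt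
      have hts : t < pvS m node := by have := pvMu_lt m node; omega
      have h1 : pvR m node t = t := by unfold pvR; rw [if_pos hts]
      have h2 := (pv_eq_iff m node t (2*t)).mp h
      rw [h1] at h2
      by_cases h2t : 2*t < pvS m node
      · rw [show pvR m node (2*t) = 2*t from by unfold pvR; rw [if_pos h2t]] at h2
        omega
      · have hms := pvMu_lt m node
        rw [pvR_ge m node (2*t) (by omega)] at h2
        omega
    refine ⟨hmu, ?_⟩
    have h2 := (pv_eq_iff_ge m node t (2*t) hmu (by omega)).mp h
    have h3 : pvLam m node ∣ (2*t - pvMu m node) - (t - pvMu m node) :=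
      (Nat.modEq_iff_dvd' (by omega)).mp h2
    have : (2*t - pvMu m node) - (t - pvMu m node) = t := by omega
    rwa [this] at h3
  · rintro ⟨hmu, c, rfl⟩
    rw [pv_eq_iff_ge m node _ _ hmu (by omega)]
    have : 2 * (pvLam m node * c) - pvMu m node = (pvLam m node * c - pvMu m node) + c * pvLam m node := by
      have h0 := pvLam_pos m node
      have : pvLam m node * c = c * pvLam m node := by ring
      omega
    rw [this, Nat.add_mul_mod_self_right]

lemma pvKExists (m : List (Int × Int)) (node : Int) :
    ∃ t, 1 ≤ t ∧ pvMu m node ≤ t ∧ pvLam m node ∣ t := by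
  refine ⟨pvLam m node * (pvMu m node / pvLam m node + 1), ?_, ?_, Dvd.intro _ rfl⟩
  · exact Nat.mul_pos (pvLam_pos m node) (Nat.succ_pos _)
  · have h1 := Nat.div_add_mod (pvMu m node) (pvLam m node)
    have h2 := Nat.mod_lt (pvMu m node) (pvLam_pos m node)
    rw [Nat.mul_add, Nat.mul_one]
    omega

def pvK (m : List (Int × Int)) (node : Int) : Nat := Nat.find (pvKExists m node)

lemma pvK_spec (m : List (Int × Int)) (node : Int) :
    1 ≤ pvK m node ∧ pvMu m node ≤ pvK m node ∧ pvLam m node ∣ pvK m node :=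
  Nat.find_spec (pvKExists m node)

lemma pvK_min (m : List (Int × Int)) (node : Int) (t : Nat)
    (h : 1 ≤ t ∧ pvMu m node ≤ t ∧ pvLam m node ∣ t) : pvK m node ≤ t :=
  Nat.find_min' (pvKExists m node) h

lemma pvK_le_s (m : List (Int × Int)) (node : Int) : pvK m node ≤ pvS m node := by
  have h1 : pvK m node ≤ pvLam m node * (pvMu m node / pvLam m node + 1) := by
    apply pvK_min
    refine ⟨?_, ?_, Dvd.intro _ rfl⟩
    · exact Nat.mul_pos (pvLam_pos m node) (Nat.succ_pos _)
    · have h1 := Nat.div_add_mod (pvMu m node) (pvLam m node)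
      have h2 := Nat.mod_lt (pvMu m node) (pvLam_pos m node)
      rw [Nat.mul_add, Nat.mul_one]
      omega
  have h2 : pvLam m node * (pvMu m node / pvLam m node) ≤ pvMu m node := by
    rw [Nat.mul_comm]
    exact Nat.div_mul_le_self _ _
  have h3 := pv_mu_lam_s m node
  have h4 : pvLam m node * (pvMu m node / pvLam m node + 1) ≤ pvMu m node + pvLam m node := by
    rw [Nat.mul_add, Nat.mul_one]
    omega
  omega

-- ===== case T: the walk reaches a terminal (pvMem at the entry is false) =====

lemma caseT_absorb (m : List (Int × Int)) (node : Int)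
    (hT : pvMem m (pvIt m node (pvMu m node)) = false) :
    ∀ t, pvMu m node ≤ t → pvIt m node t = pvIt m node (pvMu m node) := by
  intro t ht
  induction t, ht using Nat.le_induction with
  | base => rfl
  | succ n hn ih => rw [pvIt_succ, ih, pvStep_absorb _ _ hT]

lemma caseT_s (m : List (Int × Int)) (node : Int)
    (hT : pvMem m (pvIt m node (pvMu m node)) = false) :
    pvS m node = pvMu m node + 1 := by
  have h1 : pvIt m node (pvMu m node + 1) = pvIt m node (pvMu m node) := by
    rw [pvIt_succ, pvStep_absorb _ _ hT]
  have h2 : pvS m node ≤ pvMu m node + 1 :=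
    Nat.find_le ((pvRepB_iff m node _).mpr ⟨pvMu m node, by omega, h1.symm⟩)
  have := pvMu_lt m node
  omega

lemma caseT_memT (m : List (Int × Int)) (node : Int)
    (hT : pvMem m (pvIt m node (pvMu m node)) = false) :
    ∀ t, t < pvMu m node → pvMem m (pvIt m node t) = true := by
  intro t ht
  exact pv_mem_of_succ_lt m node t (by rw [caseT_s m node hT]; omega)

lemma caseT_mu_le (m : List (Int × Int)) (node : Int)
    (hT : pvMem m (pvIt m node (pvMu m node)) = false) :
    pvMu m node ≤ m.length := by
  apply pvCount m node _ (fun i hi => caseT_memT m node hT i hi)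
  intro i j hij hj
  exact fun h => pvS_min m node j (lt_trans hj (pvMu_lt m node)) i hij h

-- ===== case C: a genuine cycle (pvMem at the entry is true) =====

lemma caseC_memAll (m : List (Int × Int)) (node : Int)
    (hC : pvMem m (pvIt m node (pvMu m node)) = true) :
    ∀ t, pvMem m (pvIt m node t) = true := by
  intro t
  rw [← pvIt_pvR m node t]
  by_cases h1 : pvR m node t + 1 < pvS m node
  · exact pv_mem_of_succ_lt m node _ h1
  · have h2 : pvR m node t + 1 = pvS m node := by have := pvR_lt m node t; omega
    by_contra hm
    have hm' : pvMem m (pvIt m node (pvR m node t)) = false := Bool.eq_false_iff.mpr (by simpa using hm)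
    have h3 : pvIt m node (pvR m node t + 1) = pvIt m node (pvR m node t) := by
      rw [pvIt_succ, pvStep_absorb _ _ hm']
    rw [h2] at h3
    have h4 := pv_eq_s m node (pvR m node t) (pvR_lt m node t) h3.symm
    rw [h4] at hm'
    rw [hm'] at hC
    exact absurd hC (by simp)

lemma caseC_s_le (m : List (Int × Int)) (node : Int)
    (hC : pvMem m (pvIt m node (pvMu m node)) = true) :
    pvS m node ≤ m.length := by
  apply pvCount m node _ (fun i _ => caseC_memAll m node hC i)
  intro i j hij hj
  exact fun h => pvS_min m node j hj i hij h

-- ===== port A returns pvIt μ =====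

lemma loopA_T (m : List (Int × Int)) (node : Int)
    (hT : pvMem m (pvIt m node (pvMu m node)) = false) :
    ∀ (f i : Nat) (seen : PySem.Set Int),
      pvMu m node ≤ i + f → i ≤ pvMu m node →
      (∀ y, y ∈ seen ↔ ∃ j, j < i ∧ pvIt m node j = y) →
      rootOfLoopA m (f+1) (pvIt m node i) seen = pvIt m node (pvMu m node) := by
  intro f
  induction f with
  | zero =>
    intro i seen hif hile hseen
    have hi : i = pvMu m node := by omega
    subst hi
    simp only [rootOfLoopA, hT, Bool.false_eq_true, if_false]
  | succ f ih =>
    intro i seen hif hile hseen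
    by_cases hi : i = pvMu m node
    · subst hi
      simp only [rootOfLoopA, hT, Bool.false_eq_true, if_false]
    · have hilt : i < pvMu m node := by omega
      have hmem : pvMem m (pvIt m node i) = true := caseT_memT m node hT i hilt
      have hcont : seen.contains (pvIt m node i) = false := by
        rw [Bool.eq_false_iff]
        intro hc
        obtain ⟨j, hj, hje⟩ := (hseen _).mp ((PySem.Set.contains_iff seen _).mp hc)
        exact pvS_min m node i (by have := pvMu_lt m node; omega) j hj hje
      simp only [rootOfLoopA, hmem, if_true, hcont, Bool.false_eq_true, if_false]
      rw [← pvIt_succ]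
      apply ih (i+1) _ (by omega) (by omega)
      intro y
      rw [PySem.Set.mem_add]
      constructor
      · rintro (hy | rfl)
        · obtain ⟨j, hj, hje⟩ := (hseen y).mp hy
          exact ⟨j, by omega, hje⟩
        · exact ⟨i, by omega, rfl⟩
      · rintro ⟨j, hj, hje⟩
        by_cases hji : j = i
        · subst hji; right; exact hje.symm
        · left; exact (hseen y).mpr ⟨j, by omega, hje⟩

lemma loopA_C (m : List (Int × Int)) (node : Int)
    (hC : pvMem m (pvIt m node (pvMu m node)) = true) :
    ∀ (f i : Nat) (seen : PySem.Set Int),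
      pvS m node ≤ i + f → i ≤ pvS m node →
      (∀ y, y ∈ seen ↔ ∃ j, j < i ∧ pvIt m node j = y) →
      rootOfLoopA m (f+1) (pvIt m node i) seen = pvIt m node (pvMu m node) := by
  intro f
  induction f with
  | zero =>
    intro i seen hif hile hseen
    have hi : i = pvS m node := by omega
    subst hi
    have hmem := caseC_memAll m node hC (pvS m node)
    have hcont : seen.contains (pvIt m node (pvS m node)) = true :=
      (PySem.Set.contains_iff seen _).mpr ((hseen _).mpr ⟨pvMu m node, pvMu_lt m node, pvMu_eq m node⟩)
    simp only [rootOfLoopA, hmem, if_true, hcont]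
    exact (pvMu_eq m node).symm
  | succ f ih =>
    intro i seen hif hile hseen
    by_cases hi : i = pvS m node
    · subst hi
      have hmem := caseC_memAll m node hC (pvS m node)
      have hcont : seen.contains (pvIt m node (pvS m node)) = true :=
        (PySem.Set.contains_iff seen _).mpr ((hseen _).mpr ⟨pvMu m node, pvMu_lt m node, pvMu_eq m node⟩)
      simp only [rootOfLoopA, hmem, if_true, hcont]
      exact (pvMu_eq m node).symm
    · have hilt : i < pvS m node := by omega
      have hmem := caseC_memAll m node hC i
      have hcont : seen.contains (pvIt m node i) = false := by
        rw [Bool.eq_false_iff]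
        intro hc
        obtain ⟨j, hj, hje⟩ := (hseen _).mp ((PySem.Set.contains_iff seen _).mp hc)
        exact pvS_min m node i hilt j hj hje
      simp only [rootOfLoopA, hmem, if_true, hcont, Bool.false_eq_true, if_false]
      rw [← pvIt_succ]
      apply ih (i+1) _ (by omega) (by omega)
      intro y
      rw [PySem.Set.mem_add]
      constructor
      · rintro (hy | rfl)
        · obtain ⟨j, hj, hje⟩ := (hseen y).mp hy
          exact ⟨j, by omega, hje⟩
        · exact ⟨i, by omega, rfl⟩
      · rintro ⟨j, hj, hje⟩
        by_cases hji : j = i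
        · subst hji; right; exact hje.symm
        · left; exact (hseen y).mpr ⟨j, by omega, hje⟩

lemma portA_eq (m : List (Int × Int)) (node : Int) :
    root_of_py node m = pvIt m node (pvMu m node) := by
  have hseen : ∀ y : Int, y ∈ (PySem.Set.empty : PySem.Set Int) ↔ ∃ j, j < 0 ∧ pvIt m node j = y := by
    intro y
    constructor
    · intro h; exact absurd h (by simp [PySem.Set.empty])
    · rintro ⟨j, hj, _⟩; omega
  by_cases hC : pvMem m (pvIt m node (pvMu m node)) = true
  · have h1 := caseC_s_le m node hC
    exact loopA_C m node hC m.length 0 PySem.Set.empty (by omega) (by omega) hseen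
  · have hT : pvMem m (pvIt m node (pvMu m node)) = false := Bool.eq_false_iff.mpr (by simpa using hC)
    have h1 := caseT_mu_le m node hT
    exact loopA_T m node hT m.length 0 PySem.Set.empty (by omega) (by omega) hseen

-- ===== port B returns pvIt μ =====

lemma loop2_C (m : List (Int × Int)) (node : Int)
    (b : Nat) (hbd : pvLam m node ∣ b) (hμb : pvMu m node ≤ b) :
    ∀ (f u : Nat), u ≤ pvMu m node → pvMu m node ≤ u + f →
      rootOfLoop2 m (f+1) (pvIt m node u) (pvIt m node (b + u)) = pvIt m node (pvMu m node) := by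
  have heqμ : pvIt m node (pvMu m node) = pvIt m node (b + pvMu m node) := by
    rw [pv_eq_iff_ge m node _ _ (le_refl _) (by omega)]
    obtain ⟨c, rfl⟩ := hbd
    rw [show pvMu m node - pvMu m node = 0 from by omega,
        show pvLam m node * c + pvMu m node - pvMu m node = c * pvLam m node from by
          have h : pvLam m node * c = c * pvLam m node := by ring
          omega,
        Nat.zero_mod, Nat.mul_mod_left]
  have hneq : ∀ u, u < pvMu m node → pvIt m node u ≠ pvIt m node (b + u) := by
    intro u hu heq
    have h1 := (pv_eq_iff m node u (b + u)).mp heq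
    have hus : u < pvS m node := by have := pvMu_lt m node; omega
    rw [show pvR m node u = u from by unfold pvR; rw [if_pos hus]] at h1
    rw [pvR_ge m node (b + u) (by omega)] at h1
    omega
  intro f
  induction f with
  | zero =>
    intro u hu huf
    have hu' : u = pvMu m node := by omega
    subst hu'
    simp only [rootOfLoop2]
    rw [if_pos heqμ]
  | succ f ih =>
    intro u hu huf
    by_cases hu' : u = pvMu m node
    · subst hu'
      simp only [rootOfLoop2]
      rw [if_pos heqμ]
    · have hult : u < pvMu m node := by omega
      simp only [rootOfLoop2]
      rw [if_neg (hneq u hult)]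
      rw [← pvIt_succ m node u, ← pvIt_succ m node (b + u),
          show b + u + 1 = b + (u + 1) from by omega]
      exact ih (u+1) (by omega) (by omega)

lemma loop1_T (m : List (Int × Int)) (node : Int)
    (hT : pvMem m (pvIt m node (pvMu m node)) = false) :
    ∀ (f t : Nat), pvMu m node ≤ 2*t + 2*f →
      rootOfLoop1 m node (f+1) (pvIt m node t) (pvIt m node (2*t)) = pvIt m node (pvMu m node) := by
  have habs := caseT_absorb m node hT
  have hmemF : ∀ u, pvMu m node ≤ u → pvMem m (pvIt m node u) = false := by
    intro u hu; rw [habs u hu]; exact hT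
  have hmemT := caseT_memT m node hT
  intro f
  induction f with
  | zero =>
    intro t h2f
    have h1 : pvMu m node ≤ 2*t := by omega
    simp only [rootOfLoop1, hmemF (2*t) h1, Bool.false_eq_true, if_false]
    exact habs (2*t) h1
  | succ f ih =>
    intro t h2f
    by_cases h1 : pvMu m node ≤ 2*t
    · simp only [rootOfLoop1, hmemF (2*t) h1, Bool.false_eq_true, if_false]
      exact habs (2*t) h1
    · have hm1 : pvMem m (pvIt m node (2*t)) = true := hmemT (2*t) (by omega)
      simp only [rootOfLoop1, hm1, if_true]
      rw [← pvIt_succ m node (2*t)]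
      by_cases h2 : pvMu m node ≤ 2*t+1
      · simp only [hmemF (2*t+1) h2, Bool.false_eq_true, if_false]
        exact habs (2*t+1) h2
      · have hm2 : pvMem m (pvIt m node (2*t+1)) = true := hmemT (2*t+1) (by omega)
        simp only [hm2, if_true]
        rw [← pvIt_succ m node (2*t+1), ← pvIt_succ m node t]
        have hneq : pvIt m node (t+1) ≠ pvIt m node (2*t+1+1) := by
          intro heq
          have hs := pvMu_lt m node
          exact pvS_min m node (2*t+1+1) (by omega) (t+1) (by omega) heq
        rw [if_neg hneq, show 2*t+1+1 = 2*(t+1) from by omega]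
        exact ih (t+1) (by omega)

lemma loop1_break (m : List (Int × Int)) (node : Int)
    (hC : pvMem m (pvIt m node (pvMu m node)) = true)
    (hμlen : pvMu m node ≤ m.length)
    (f t : Nat) (htk : t + 1 = pvK m node) :
    rootOfLoop1 m node (f+1) (pvIt m node t) (pvIt m node (2*t)) = pvIt m node (pvMu m node) := by
  have hmemAll := caseC_memAll m node hC
  have hk := pvK_spec m node
  simp only [rootOfLoop1, hmemAll (2*t), if_true]
  rw [← pvIt_succ m node (2*t)]
  simp only [hmemAll (2*t+1), if_true]
  rw [← pvIt_succ m node (2*t+1), ← pvIt_succ m node t]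
  have hbreak : pvIt m node (t+1) = pvIt m node (2*t+1+1) := by
    rw [show 2*t+1+1 = 2*(t+1) from by omega]
    exact (pv_break_iff m node (t+1) (by omega)).mpr (by rw [htk]; exact ⟨hk.2.1, hk.2.2⟩)
  rw [if_pos hbreak, show 2*t+1+1 = 2*(t+1) from by omega, htk]
  have h2 := loop2_C m node (2 * pvK m node) (hk.2.2.mul_left 2) (by omega) m.length 0
      (by omega) (by omega)
  simpa using h2

lemma loop1_C (m : List (Int × Int)) (node : Int)
    (hC : pvMem m (pvIt m node (pvMu m node)) = true)
    (hμlen : pvMu m node ≤ m.length) :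
    ∀ (f t : Nat), t < pvK m node → pvK m node ≤ t + f + 1 →
      rootOfLoop1 m node (f+1) (pvIt m node t) (pvIt m node (2*t)) = pvIt m node (pvMu m node) := by
  have hmemAll := caseC_memAll m node hC
  intro f
  induction f with
  | zero =>
    intro t ht hf
    exact loop1_break m node hC hμlen 0 t (by omega)
  | succ f ih =>
    intro t ht hf
    by_cases htk : t + 1 = pvK m node
    · exact loop1_break m node hC hμlen (f+1) t htk
    · have ht1 : t + 1 < pvK m node := by omega
      simp only [rootOfLoop1, hmemAll (2*t), if_true]
      rw [← pvIt_succ m node (2*t)]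
      simp only [hmemAll (2*t+1), if_true]
      rw [← pvIt_succ m node (2*t+1), ← pvIt_succ m node t]
      have hnb : pvIt m node (t+1) ≠ pvIt m node (2*t+1+1) := by
        intro heq
        rw [show 2*t+1+1 = 2*(t+1) from by omega] at heq
        have hbc := (pv_break_iff m node (t+1) (by omega)).mp heq
        have := pvK_min m node (t+1) ⟨by omega, hbc.1, hbc.2⟩
        omega
      rw [if_neg hnb, show 2*t+1+1 = 2*(t+1) from by omega]
      exact ih (t+1) ht1 (by omega)

lemma portB_eq (m : List (Int × Int)) (node : Int) :
    root_of_py_alt node m = pvIt m node (pvMu m node) := by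
  by_cases hC : pvMem m (pvIt m node (pvMu m node)) = true
  · have h1 := caseC_s_le m node hC
    have h2 := pvK_le_s m node
    have h3 := (pvK_spec m node).1
    have hμlen : pvMu m node ≤ m.length := by have := pvMu_lt m node; omega
    exact loop1_C m node hC hμlen m.length 0 (by omega) (by omega)
  · have hT : pvMem m (pvIt m node (pvMu m node)) = false := Bool.eq_false_iff.mpr (by simpa using hC)
    have h1 := caseT_mu_le m node hT
    exact loop1_T m node hT m.length 0 (by omega)

-- ===== VERDICT (by name: the statement is the Claim_ definition above) =====
theorem root_of_py_spec : Claim_equal_root_of_py := by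
  intro node m _
  unfold Spec_root_of_py
  rw [portA_eq m node, portB_eq m node]
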